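-- pv_equiv track=rewrite | github.com/elenaviter/kdcube-ai-app | app/ai-app/services/kdcube-ai-app/kdcube_ai_app/apps/chat/sdk/retrieval/kb_client.py | _patch_placeholders
-- ===== SOURCE A (Python) =====
-- def _patch_placeholders(clauses: list[str], start_index: int) -> tuple[list[str], int]:
--     """
--     Replace each '$%s' with sequential $N starting at start_index+1.
--     Returns (patched_clauses, last_index).
--     """
--     idx = start_index
--     patched: list[str] = []
--     for clause in clauses:
--         # replace one placeholder at a time so each gets a unique index
--         while "$%s" in clause:
--             idx += 1
--             clause = clause.replace("$%s", f"${idx}", 1)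
--         patched.append(clause)
--     return patched, idx
-- ===== SOURCE B (Python) =====
-- def _patch_placeholders(clauses: list[str], start_index: int) -> tuple[list[str], int]:
--     # Single left-to-right scan per clause: copy characters, and on each "$%s"
--     # emit the next sequential "$N" token.
--     idx = start_index
--     patched: list[str] = []
--     for clause in clauses:
--         pieces: list[str] = []
--         i = 0
--         n = len(clause)
--         while i < n:
--             if clause.startswith("$%s", i):
--                 idx += 1
--                 pieces.append(f"${idx}")
--                 i += 3
--             else:
--                 pieces.append(clause[i])
--                 i += 1
--         patched.append("".join(pieces))
--     return patched, idx
-- ===== Notes on version B (the rewrite author's own statement) =====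
-- stated objective: alternative
-- what changed: A repeatedly rescans the clause from the start ('$%s' in clause + replace(...,1)) once per placeholder; B makes a single left-to-right scan per clause, emitting the next $N token at each '$%s' and copying other characters.
import Mathlib
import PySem

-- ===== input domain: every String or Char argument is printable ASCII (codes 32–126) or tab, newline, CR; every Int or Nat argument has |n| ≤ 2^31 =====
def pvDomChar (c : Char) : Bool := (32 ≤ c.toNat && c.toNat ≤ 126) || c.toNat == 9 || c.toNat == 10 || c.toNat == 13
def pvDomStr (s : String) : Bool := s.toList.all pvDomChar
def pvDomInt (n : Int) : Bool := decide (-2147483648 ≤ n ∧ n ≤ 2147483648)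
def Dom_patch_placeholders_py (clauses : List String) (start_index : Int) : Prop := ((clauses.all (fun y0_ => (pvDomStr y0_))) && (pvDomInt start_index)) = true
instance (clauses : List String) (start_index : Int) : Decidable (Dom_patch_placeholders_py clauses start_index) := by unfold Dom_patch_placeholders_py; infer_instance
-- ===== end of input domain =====

-- B replaces A's repeated rescan-and-replace ("$%s" in clause + replace(...,1) per placeholder)
-- by a single left-to-right scan per clause (objective: alternative algorithm, same result).

-- shared literals of both Pythons: the placeholder "$%s" and the token f"${i}"
def pvSep : List Char := ['$', '%', 's']
def pvTok (i : Int) : List Char := '$' :: (PySem.Int.toStr i).toList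

-- ===== PORT A =====
-- hand port of clause.replace(old, new, 1) (PySem.Chars.replace has no count argument):
-- replace the FIRST occurrence of old; exact for nonempty old (here old = "$%s")
def pvReplaceOnce (s old new : List Char) : List Char :=
  let i := PySem.Chars.find s old
  if i = -1 then s else s.take i.toNat ++ new ++ s.drop (i.toNat + old.length)

-- the inner `while "$%s" in clause` loop; fuel = initial clause length bounds the
-- iteration count (one iteration per occurrence, and occurrences ≤ length)
def pvWhileA (fuel : Nat) (idx : Int) (cs : List Char) : Int × List Char :=
  match fuel with
  | 0 => (idx, cs)
  | f + 1 =>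
    if PySem.Chars.isIn pvSep cs then
      pvWhileA f (idx + 1) (pvReplaceOnce cs pvSep (pvTok (idx + 1)))
    else (idx, cs)

def patch_placeholders_py (clauses : List String) (start_index : Int) : List String × Int :=
  let r := clauses.foldl (fun (st : List String × Int) clause =>
    let cs := clause.toList
    let p := pvWhileA cs.length st.2 cs
    (st.1 ++ [String.ofList p.2], p.1)) ([], start_index)
  (r.1, r.2)

-- ===== PORT B =====
-- single scan: at each position test clause.startswith("$%s", i); emit token or copy char
def pvScanB (cs : List Char) (idx : Int) (pieces : List (List Char)) : List (List Char) × Int :=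
  match cs with
  | [] => (pieces, idx)
  | c :: rest =>
    if pvSep.isPrefixOf (c :: rest) then
      pvScanB (rest.drop 2) (idx + 1) (pieces ++ [pvTok (idx + 1)])
    else
      pvScanB rest idx (pieces ++ [[c]])
termination_by cs.length
decreasing_by
  · simp only [List.length_cons, List.length_drop]; omega
  · simp

def patch_placeholders_py_alt (clauses : List String) (start_index : Int) : List String × Int :=
  clauses.foldl (fun (st : List String × Int) clause =>
    let p := pvScanB clause.toList st.2 []
    (st.1 ++ [String.ofList (PySem.Chars.join [] p.1)], p.2)) ([], start_index)

-- ===== PRECONDITION & SPEC =====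
def Spec_patch_placeholders_py (clauses : List String) (start_index : Int) (out : List String × Int) : Prop := out = patch_placeholders_py_alt clauses start_index
instance (clauses : List String) (start_index : Int) (out : List String × Int) : Decidable (Spec_patch_placeholders_py clauses start_index out) := by unfold Spec_patch_placeholders_py; infer_instance

-- ===== CLAIM (what is proved, stated in full; the proofs are below) =====
def Claim_equal_patch_placeholders_py : Prop := ∀ (clauses : List String) (start_index : Int), Dom_patch_placeholders_py clauses start_index → Spec_patch_placeholders_py clauses start_index (patch_placeholders_py clauses start_index)

-- ===== LEMMAS AND PROOFS =====

-- reference scan (accumulator-free form of B's inner loop)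
def pvS (cs : List Char) (idx : Int) : List Char × Int :=
  match cs with
  | [] => ([], idx)
  | c :: rest =>
    if pvSep.isPrefixOf (c :: rest) then
      let p := pvS (rest.drop 2) (idx + 1); (pvTok (idx + 1) ++ p.1, p.2)
    else
      let p := pvS rest idx; (c :: p.1, p.2)
termination_by cs.length
decreasing_by
  · simp only [List.length_cons, List.length_drop]; omega
  · simp

-- number of placeholder occurrences, scanned left to right
def pvCnt (cs : List Char) : Nat :=
  match cs with
  | [] => 0
  | c :: rest =>
    if pvSep.isPrefixOf (c :: rest) then pvCnt (rest.drop 2) + 1 else pvCnt rest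
termination_by cs.length
decreasing_by
  · simp only [List.length_cons, List.length_drop]; omega
  · simp

-- "no occurrence of pvSep starts inside q" (in the string q ++ rest)
def pvClean : List Char → List Char → Prop
  | [], _ => True
  | c :: q, rest => ¬ pvSep <+: (c :: (q ++ rest)) ∧ pvClean q rest

theorem pvClean_minimal {a b : List Char}
    (h : ∀ j < a.length, ¬ pvSep <+: (a ++ b).drop j) : pvClean a b := by
  induction a with
  | nil => trivial
  | cons c q ih =>
    refine ⟨h 0 (by simp), ih ?_⟩
    intro j hj
    have := h (j + 1) (by simpa using Nat.succ_lt_succ hj)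
    simpa using this

theorem pvClean_to_minimal {a b : List Char} (h : pvClean a b) :
    ∀ j < a.length, ¬ pvSep <+: (a ++ b).drop j := by
  induction a with
  | nil => intro j hj; simp at hj
  | cons c q ih =>
    intro j hj
    cases j with
    | zero => simpa using h.1
    | succ j => exact fun hp => ih h.2 j (by simpa using Nat.lt_of_succ_lt_succ hj) (by simpa using hp)

theorem pvS_no_occ {cs : List Char} (h : ¬ pvSep <:+: cs) (idx : Int) :
    pvS cs idx = (cs, idx) := by
  induction cs with
  | nil => simp [pvS]
  | cons c rest ih =>
    rw [pvS]
    have hnp : pvSep.isPrefixOf (c :: rest) = false := by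
      rw [Bool.eq_false_iff, ne_eq, List.isPrefixOf_iff_prefix]
      exact fun hp => h hp.isInfix
    simp only [hnp, Bool.false_eq_true, if_false]
    rw [ih (fun hi => h (List.infix_cons hi))]

theorem pvS_clean_prefix {q rest : List Char} (h : pvClean q rest) (idx : Int) :
    pvS (q ++ rest) idx = (q ++ (pvS rest idx).1, (pvS rest idx).2) := by
  induction q with
  | nil => simp
  | cons c q ih =>
    obtain ⟨h1, h2⟩ := h
    rw [List.cons_append, pvS]
    have hnp : pvSep.isPrefixOf (c :: (q ++ rest)) = false := by
      rw [Bool.eq_false_iff, ne_eq, List.isPrefixOf_iff_prefix]; exact h1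
    simp only [hnp, Bool.false_eq_true, if_false, ih h2]
    simp

theorem pvCnt_clean_prefix {q rest : List Char} (h : pvClean q rest) :
    pvCnt (q ++ rest) = pvCnt rest := by
  induction q with
  | nil => simp
  | cons c q ih =>
    obtain ⟨h1, h2⟩ := h
    rw [List.cons_append, pvCnt]
    have hnp : pvSep.isPrefixOf (c :: (q ++ rest)) = false := by
      rw [Bool.eq_false_iff, ne_eq, List.isPrefixOf_iff_prefix]; exact h1
    simp only [hnp, Bool.false_eq_true, if_false, ih h2]

theorem pvS_token (rest : List Char) (idx : Int) :
    pvS (pvSep ++ rest) idx = (pvTok (idx + 1) ++ (pvS rest (idx + 1)).1, (pvS rest (idx + 1)).2) := by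
  show pvS ('$' :: '%' :: 's' :: rest) idx = _
  rw [pvS]
  have : pvSep.isPrefixOf ('$' :: '%' :: 's' :: rest) = true := by
    rw [List.isPrefixOf_iff_prefix]; exact ⟨rest, rfl⟩
  simp [this]

theorem pvCnt_token (rest : List Char) : pvCnt (pvSep ++ rest) = pvCnt rest + 1 := by
  show pvCnt ('$' :: '%' :: 's' :: rest) = _
  rw [pvCnt]
  have : pvSep.isPrefixOf ('$' :: '%' :: 's' :: rest) = true := by
    rw [List.isPrefixOf_iff_prefix]; exact ⟨rest, rfl⟩
  simp [this]

theorem pvCnt_le_len (cs : List Char) : pvCnt cs ≤ cs.length := by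
  induction cs using pvCnt.induct with
  | case1 => simp [pvCnt]
  | case2 c rest hp ih =>
    rw [pvCnt]; simp only [hp, if_true]
    have h2 : (rest.drop 2).length ≤ rest.length := by simp
    simp only [List.length_cons]; omega
  | case3 c rest hp ih =>
    rw [pvCnt]; simp only [hp, Bool.false_eq_true, if_false, List.length_cons]; omega

theorem pvFind_eq {s : List Char} {i : Nat}
    (hp : pvSep <+: s.drop i) (hmin : ∀ j < i, ¬ pvSep <+: s.drop j) :
    PySem.Chars.find s pvSep = (i : Int) := by
  have hinf : pvSep <:+: s := by
    obtain ⟨t, ht⟩ := hp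
    exact ⟨s.take i, t, by rw [List.append_assoc, ht, List.take_append_drop]⟩
  have hnn : 0 ≤ PySem.Chars.find s pvSep := (PySem.Chars.find_nonneg_iff _ _).2 hinf
  obtain ⟨hf, hfm⟩ := PySem.Chars.find_spec hnn
  have h1 : ¬ (PySem.Chars.find s pvSep).toNat < i := fun hlt => hmin _ hlt hf
  have h2 : ¬ i < (PySem.Chars.find s pvSep).toNat := fun hlt => hfm _ hlt hp
  omega

theorem pvClean_mono {a b₁ b₂ : List Char}
    (h : ∀ y, y ≠ [] → pvSep <+: y ++ b₂ → pvSep <+: y ++ b₁)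
    (hc : pvClean a b₁) : pvClean a b₂ := by
  induction a with
  | nil => trivial
  | cons c q ih =>
    obtain ⟨h1, h2⟩ := hc
    refine ⟨fun hp => h1 (by simpa using h (c :: q) (by simp) (by simpa using hp)), ih h2⟩

theorem pvClean_retail {q p' r' ds : List Char}
    (h : pvClean q (p' ++ (pvSep ++ r'))) : pvClean q (p' ++ (('$' :: ds) ++ r')) := by
  refine pvClean_mono (fun y hy hp => ?_) h
  obtain ⟨t, ht⟩ := hp
  match y, ht with
  | [c1], ht =>
    match p', ht with
    | [], ht => simp [pvSep] at ht
    | [a], ht => simp [pvSep] at ht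
    | a :: b :: p'', ht =>
      simp [pvSep] at ht
      obtain ⟨rfl, rfl, rfl, -⟩ := ht
      exact ⟨p'' ++ (pvSep ++ r'), by simp [pvSep]⟩
  | [c1, c2], ht =>
    match p', ht with
    | [], ht => simp [pvSep] at ht
    | a :: p'', ht =>
      simp [pvSep] at ht
      obtain ⟨rfl, rfl, rfl, -⟩ := ht
      exact ⟨p'' ++ (pvSep ++ r'), by simp [pvSep]⟩
  | c1 :: c2 :: c3 :: y', ht =>
    simp [pvSep] at ht
    obtain ⟨rfl, rfl, rfl, -⟩ := ht
    exact ⟨y' ++ p' ++ (pvSep ++ r'), by simp [pvSep]⟩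

theorem pvDigitChar_ne {k : Nat} (hk : k < 10) :
    Nat.digitChar k ≠ '$' ∧ Nat.digitChar k ≠ '%' := by
  interval_cases k <;> exact ⟨by decide, by decide⟩

theorem pvToDigitsCore_mem : ∀ (fuel n : Nat) (ds : List Char) (c : Char),
    c ∈ Nat.toDigitsCore 10 fuel n ds → (c ≠ '$' ∧ c ≠ '%') ∨ c ∈ ds := by
  intro fuel
  induction fuel with
  | zero => intro n ds c hc; right; simpa [Nat.toDigitsCore] using hc
  | succ f ih =>
    intro n ds c hc
    rw [Nat.toDigitsCore] at hc
    by_cases h : n / 10 = 0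
    · simp only [h, if_pos] at hc
      rcases List.mem_cons.1 hc with rfl | hm
      · exact Or.inl (pvDigitChar_ne (Nat.mod_lt _ (by norm_num)))
      · exact Or.inr hm
    · simp only [if_neg h] at hc
      rcases ih _ _ _ hc with h1 | h2
      · exact Or.inl h1
      · rcases List.mem_cons.1 h2 with rfl | hm
        · exact Or.inl (pvDigitChar_ne (Nat.mod_lt _ (by norm_num)))
        · exact Or.inr hm

theorem pvToDigitsCore_ne_nil : ∀ (fuel n : Nat) (ds : List Char), ds ≠ [] →
    Nat.toDigitsCore 10 fuel n ds ≠ [] := by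
  intro fuel
  induction fuel with
  | zero => intro n ds h; simpa [Nat.toDigitsCore]
  | succ f ih =>
    intro n ds h
    rw [Nat.toDigitsCore]
    by_cases hn : n / 10 = 0
    · simp [hn]
    · simp only [if_neg hn]; exact ih _ _ (by simp)

theorem pvToDigits_ne_nil (n : Nat) : Nat.toDigits 10 n ≠ [] := by
  rw [Nat.toDigits, Nat.toDigitsCore]
  by_cases hn : n / 10 = 0
  · simp [hn]
  · simp only [if_neg hn]; exact pvToDigitsCore_ne_nil _ _ _ (by simp)

theorem pvToDigits_mem (n : Nat) : ∀ c ∈ Nat.toDigits 10 n, c ≠ '$' ∧ c ≠ '%' := by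
  intro c hc
  rcases pvToDigitsCore_mem _ _ _ _ (by simpa [Nat.toDigits] using hc) with h | h
  · exact h
  · simp at h

theorem pvToChars_mem (n : Int) : ∀ c ∈ PySem.Int.toChars n, c ≠ '$' ∧ c ≠ '%' := by
  intro c hc
  rw [PySem.Int.toChars] at hc
  split_ifs at hc with h
  · rcases List.mem_cons.1 hc with rfl | hm
    · exact ⟨by decide, by decide⟩
    · exact pvToDigits_mem _ _ hm
  · exact pvToDigits_mem _ _ hc

theorem pvToChars_ne_nil (n : Int) : PySem.Int.toChars n ≠ [] := by
  rw [PySem.Int.toChars]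
  split_ifs with h
  · simp
  · exact pvToDigits_ne_nil _

theorem pvClean_no_dollar {a : List Char} (h : ∀ c ∈ a, c ≠ '$') (r : List Char) :
    pvClean a r := by
  induction a with
  | nil => trivial
  | cons c q ih =>
    refine ⟨fun hp => ?_, ih (fun c hc => h c (List.mem_cons_of_mem _ hc))⟩
    obtain ⟨t, ht⟩ := hp
    simp only [pvSep, List.cons_append, List.nil_append, List.cons.injEq] at ht
    exact h c (by simp) ht.1.symm

theorem pvClean_tok (i : Int) (r : List Char) : pvClean (pvTok i) r := by
  rw [pvTok, PySem.Int.toList_toStr]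
  refine ⟨fun hp => ?_, pvClean_no_dollar (fun c hc => (pvToChars_mem i c hc).1) r⟩
  obtain ⟨t, ht⟩ := hp
  rcases hds : PySem.Int.toChars i with _ | ⟨d, ds'⟩
  · exact pvToChars_ne_nil i hds
  · rw [hds] at ht
    simp only [pvSep, List.cons_append, List.nil_append, List.cons.injEq] at ht
    exact (pvToChars_mem i d (by rw [hds]; simp)).2 ht.2.1.symm

theorem pvClean_append {a b r : List Char} (h1 : pvClean a (b ++ r)) (h2 : pvClean b r) :
    pvClean (a ++ b) r := by
  induction a with
  | nil => simpa
  | cons c q ih =>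
    obtain ⟨hh, ht⟩ := h1
    exact ⟨by simpa using hh, ih ht⟩

theorem pvInfix_of_right {l q rest : List Char} (h : l <:+: rest) : l <:+: q ++ rest := by
  obtain ⟨s, t, hst⟩ := h
  exact ⟨q ++ s, t, by rw [← hst]; simp⟩

theorem pvInfix_transfer {q rest : List Char} (hc : pvClean q rest)
    (h : pvSep <:+: q ++ rest) : pvSep <:+: rest := by
  obtain ⟨s, t, hst⟩ := h
  have hp : pvSep <+: (q ++ rest).drop s.length := by
    refine ⟨t, ?_⟩
    rw [← hst]
    simp
  by_cases hs : s.length < q.length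
  · exact absurd hp (pvClean_to_minimal hc _ hs)
  · have hdrop : (q ++ rest).drop s.length = rest.drop (s.length - q.length) := by
      rw [List.drop_append, List.drop_eq_nil_of_le (by omega)]
      simp
    rw [hdrop] at hp
    obtain ⟨t', ht'⟩ := hp
    exact ⟨rest.take (s.length - q.length), t',
      by rw [List.append_assoc, ht', List.take_append_drop]⟩

theorem pvCnt_pos_of_infix {cs : List Char} (h : pvSep <:+: cs) : 1 ≤ pvCnt cs := by
  induction cs using pvCnt.induct with
  | case1 => simp [pvSep] at h
  | case2 c rest hp ih => rw [pvCnt]; simp [hp]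
  | case3 c rest hp ih =>
    rw [pvCnt]; simp only [hp, Bool.false_eq_true, if_false]
    rcases List.infix_cons_iff.1 h with h1 | h2
    · exact absurd ((List.isPrefixOf_iff_prefix).2 h1) hp
    · exact ih h2

theorem pvMainA : ∀ (N : Nat) (rest q : List Char) (idx : Int) (fuel : Nat),
    pvCnt rest ≤ N → pvCnt rest ≤ fuel → pvClean q rest →
    pvWhileA fuel idx (q ++ rest) = ((pvS rest idx).2, q ++ (pvS rest idx).1) := by
  intro N
  induction N with
  | zero =>
    intro rest q idx fuel h1 h2 h3
    have hni : ¬ pvSep <:+: rest := fun hi => by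
      have := pvCnt_pos_of_infix hi; omega
    have hniq : PySem.Chars.isIn pvSep (q ++ rest) = false :=
      (PySem.Chars.isIn_eq_false_iff _ _).2 (fun hi => hni (pvInfix_transfer h3 hi))
    rw [pvS_no_occ hni]
    cases fuel with
    | zero => rfl
    | succ f => rw [pvWhileA]; simp [hniq]
  | succ N ih =>
    intro rest q idx fuel h1 h2 h3
    by_cases hin : pvSep <:+: rest
    · -- the step case
      have hnn : 0 ≤ PySem.Chars.find rest pvSep := (PySem.Chars.find_nonneg_iff _ _).2 hin
      obtain ⟨hp, hmin⟩ := PySem.Chars.find_spec hnn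
      set m := (PySem.Chars.find rest pvSep).toNat with hm
      have hmle : m ≤ rest.length := by
        have := PySem.Chars.find_le_length rest pvSep; omega
      obtain ⟨t, ht⟩ := hp
      have htr : rest.drop (m + 3) = t := by
        have : (pvSep ++ t).drop 3 = (rest.drop m).drop 3 := by rw [ht]
        simpa [pvSep, List.drop_drop] using this.symm
      have hre : rest = rest.take m ++ (pvSep ++ rest.drop (m + 3)) := by
        rw [htr, ht, List.take_append_drop]
      set p' := rest.take m with hp'
      set r' := rest.drop (m + 3) with hr'
      have hplen : p'.length = m := by simp [hp', hmle]
      have hcleanp : pvClean p' (pvSep ++ r') := by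
        refine pvClean_minimal ?_
        intro j hj
        rw [← hre]
        exact hmin j (by omega)
      have hcnt : pvCnt rest = pvCnt r' + 1 := by
        conv_lhs => rw [hre]
        rw [pvCnt_clean_prefix hcleanp, pvCnt_token]
      cases fuel with
      | zero => omega
      | succ f =>
        have hiq : PySem.Chars.isIn pvSep (q ++ rest) = true :=
          (PySem.Chars.isIn_iff_infix _ _).2 (pvInfix_of_right hin)
        rw [pvWhileA]
        simp only [hiq, if_true]
        -- the first occurrence in q ++ rest is at q.length + m
        have hfq : PySem.Chars.find (q ++ rest) pvSep = ((q.length + m : Nat) : Int) := by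
          refine pvFind_eq ?_ ?_
          · rw [List.drop_append, List.drop_eq_nil_of_le (by omega)]
            simp only [List.nil_append]
            have : q.length + m - q.length = m := by omega
            rw [this]
            exact ⟨t, ht⟩
          · intro j hj
            by_cases hjq : j < q.length
            · exact pvClean_to_minimal h3 _ hjq
            · intro hpre
              rw [List.drop_append, List.drop_eq_nil_of_le (by omega)] at hpre
              simp only [List.nil_append] at hpre
              exact hmin (j - q.length) (by omega) hpre
        have hrepl : pvReplaceOnce (q ++ rest) pvSep (pvTok (idx + 1)) =
            (q ++ (p' ++ pvTok (idx + 1))) ++ r' := by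
          rw [pvReplaceOnce]
          simp only [hfq]
          have hne : ((q.length + m : Nat) : Int) ≠ -1 := by omega
          rw [if_neg hne]
          have htn : ((q.length + m : Nat) : Int).toNat = q.length + m := by omega
          rw [htn]
          have htake : (q ++ rest).take (q.length + m) = q ++ p' := by
            rw [List.take_append, List.take_of_length_le (by omega)]
            congr 2
            omega
          have hdrop3 : (q ++ rest).drop (q.length + m + pvSep.length) = r' := by
            rw [List.drop_append, List.drop_eq_nil_of_le (by simp [pvSep]; omega)]
            simp only [List.nil_append, hr']
            congr 1
            simp [pvSep]
            omega
          rw [htake, hdrop3]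
          simp [List.append_assoc]
        rw [hrepl]
        -- new clean prefix
        have hcq : pvClean q (p' ++ (pvTok (idx + 1) ++ r')) := by
          have := pvClean_retail (q := q) (p' := p') (r' := r')
            (ds := (PySem.Int.toStr (idx + 1)).toList) (by rw [← hre]; exact h3)
          simpa [pvTok] using this
        have hcp : pvClean p' (pvTok (idx + 1) ++ r') := by
          have := pvClean_retail (q := p') (p' := ([] : List Char)) (r' := r')
            (ds := (PySem.Int.toStr (idx + 1)).toList) (by simpa using hcleanp)
          simpa [pvTok] using this
        have hclean' : pvClean (q ++ (p' ++ pvTok (idx + 1))) r' := by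
          refine pvClean_append ?_ (pvClean_append hcp (pvClean_tok _ _))
          simpa [List.append_assoc] using hcq
        have hih := ih r' (q ++ (p' ++ pvTok (idx + 1))) (idx + 1) f
          (by omega) (by omega) hclean'
        rw [hih]
        -- compute pvS rest idx
        have hSr : pvS rest idx =
            (p' ++ (pvTok (idx + 1) ++ (pvS r' (idx + 1)).1), (pvS r' (idx + 1)).2) := by
          conv_lhs => rw [hre]
          rw [pvS_clean_prefix hcleanp, pvS_token]
        rw [hSr]
        simp [List.append_assoc]
    · -- no occurrence: terminate
      have hniq : PySem.Chars.isIn pvSep (q ++ rest) = false :=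
        (PySem.Chars.isIn_eq_false_iff _ _).2 (fun hi => hin (pvInfix_transfer h3 hi))
      rw [pvS_no_occ hin]
      cases fuel with
      | zero =>
        have := pvCnt_pos_of_infix (cs := rest)
        rfl
      | succ f => rw [pvWhileA]; simp [hniq]

theorem pvJoin_nil (l : List (List Char)) : PySem.Chars.join [] l = l.flatten := by
  rw [PySem.Chars.join]
  induction l with
  | nil => simp [List.intercalate]
  | cons x xs ih =>
    cases xs with
    | nil => simp [List.intercalate]
    | cons y ys =>
      simp only [List.intercalate, List.intersperse] at *
      simp_all

theorem pvScanB_spec : ∀ (cs : List Char) (idx : Int) (pieces : List (List Char)),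
    (pvScanB cs idx pieces).1.flatten = pieces.flatten ++ (pvS cs idx).1 ∧
    (pvScanB cs idx pieces).2 = (pvS cs idx).2 := by
  intro cs idx pieces
  induction cs, idx, pieces using pvScanB.induct with
  | case1 idx pieces => simp [pvScanB, pvS]
  | case2 c rest idx pieces hp ih =>
    rw [pvScanB, pvS]
    simp only [hp, if_true]
    obtain ⟨ih1, ih2⟩ := ih
    refine ⟨?_, by simpa using ih2⟩
    rw [ih1]
    simp
  | case3 c rest idx pieces hp ih =>
    rw [pvScanB, pvS]
    simp only [hp, Bool.false_eq_true, if_false]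
    obtain ⟨ih1, ih2⟩ := ih
    refine ⟨?_, by simpa using ih2⟩
    rw [ih1]
    simp

theorem pvClause_eq (cs : List Char) (idx : Int) :
    pvWhileA cs.length idx cs = ((pvS cs idx).2, (pvS cs idx).1) := by
  have h := pvMainA (pvCnt cs) cs [] idx cs.length (le_refl _) (pvCnt_le_len cs) trivial
  simpa using h

-- ===== VERDICT (by name: the statement is the Claim_ definition above) =====
theorem pvStep_eq (st : List String × Int) (clause : String) :
    (st.1 ++ [String.ofList (pvWhileA clause.toList.length st.2 clause.toList).2],
      (pvWhileA clause.toList.length st.2 clause.toList).1) =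
    (st.1 ++ [String.ofList (PySem.Chars.join [] (pvScanB clause.toList st.2 []).1)],
      (pvScanB clause.toList st.2 []).2) := by
  obtain ⟨hb1, hb2⟩ := pvScanB_spec clause.toList st.2 []
  rw [pvClause_eq, pvJoin_nil, hb1, hb2]
  simp

theorem pvFold_eq : ∀ (clauses : List String) (st : List String × Int),
    clauses.foldl (fun st clause =>
      (st.1 ++ [String.ofList (pvWhileA clause.toList.length st.2 clause.toList).2],
        (pvWhileA clause.toList.length st.2 clause.toList).1)) st
    = clauses.foldl (fun st clause =>
      (st.1 ++ [String.ofList (PySem.Chars.join [] (pvScanB clause.toList st.2 []).1)],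
        (pvScanB clause.toList st.2 []).2)) st := by
  intro clauses
  induction clauses with
  | nil => intro st; rfl
  | cons c rest ih =>
    intro st
    simp only [List.foldl_cons]
    rw [pvStep_eq]
    exact ih _

theorem patch_placeholders_py_spec : Claim_equal_patch_placeholders_py := by
  intro clauses start_index _
  unfold Spec_patch_placeholders_py patch_placeholders_py patch_placeholders_py_alt
  exact pvFold_eq clauses ([], start_index)
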